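-- pv_equiv track=rewrite | github.com/aditya-iitm/BT3051-2019 | hw1a.py | get_orientations
-- ===== SOURCE A (Python) =====
-- def revc(string):
--     # This function returns the reverse complement of the given dna sequence as a string
--     comp = {'A':'T','T':'A','G':'C','C':'G'}
--     new = ''
--     for i in range(len(string)):
--         new += comp[string[i]]
--     return new[::-1]
--
-- def get_orientations(dna_sequence):
--     """
--     # (str) -> (list of strings)
--     # This function takes a DNA sequence and returns the six possible reading
--     # frames for the sequence, 3 on the strand and 3 on the reverse complement.
--     # It has also been ensured that the strands have a length, multiple of three.
--     >>> get_orientations('AATGGCCTAA')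
--     ['AATGGCCTA', 'ATGGCCTAA', 'TGGCCT', 'TTAGGCCAT', 'TAGGCCATT', 'AGGCCA']
--     """
--     dna_sequence = dna_sequence.upper()
--     revc_sequence = revc(dna_sequence)
--     sequences = [None]*6
--     n = len(dna_sequence)//3
--     r = len(dna_sequence)%3
--     for i in range(3):
--         if r == 2:
--             sequences[i] = dna_sequence[i:3*n+i]
--             sequences[3+i] = revc_sequence[i:3*n+i]
--         elif r == 1:
--             if i !=2 :
--                 sequences[i] = dna_sequence[i:3*n+i]
--                 sequences[3+i] = revc_sequence[i:3*n+i]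
--             else:
--                 sequences[i] = dna_sequence[2:3*n-1]
--                 sequences[3+i] = revc_sequence[2:3*n-1]
--         else:
--             if i != 0:
--                 sequences[i] = dna_sequence[i:3*n+i-3]
--                 sequences[3+i] = revc_sequence[i:3*n+i-3]
--             else:
--                 sequences[i] = dna_sequence[0:3*n]
--                 sequences[3+i] = revc_sequence[0:3*n]
--
--     return sequences
-- ===== SOURCE B (Python) =====
-- def get_orientations(dna_sequence):
--     # Codon-chunking algorithm: no len//3 / len%3 arithmetic at all.  The reverse
--     # complement is built in one forward pass by PREPENDING complements (no reversal
--     # step), and each frame is produced by greedily peeling off 3-character codons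
--     # and joining them, so the multiple-of-three truncation emerges from the chunking.
--     comp = {'A': 'T', 'T': 'A', 'G': 'C', 'C': 'G'}
--     seq = dna_sequence.upper()
--     rev = ''
--     for c in seq:
--         rev = comp[c] + rev
--
--     def codons(s):
--         out = []
--         while len(s) >= 3:
--             out.append(s[:3])
--             s = s[3:]
--         return out
--
--     return [''.join(codons(strand[i:])) for strand in (seq, rev) for i in range(3)]
-- ===== Notes on version B (the rewrite author's own statement) =====
-- stated objective: alternative
-- what changed: Replaces A's len//3 / len%3 slice-endpoint case analysis with a codon-chunking algorithm: each frame is built by greedily peeling 3-character codons off strand[i:] and joining them (truncation to a multiple of three emerges from the chunking, no division arithmetic), and the reverse complement is built in one forward pass by prepending complements instead of an append loop plus [::-1]. Pre_ excludes inputs containing a character other than A/C/G/T (case-insensitive), on which both A and B raise KeyError.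
import Mathlib
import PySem

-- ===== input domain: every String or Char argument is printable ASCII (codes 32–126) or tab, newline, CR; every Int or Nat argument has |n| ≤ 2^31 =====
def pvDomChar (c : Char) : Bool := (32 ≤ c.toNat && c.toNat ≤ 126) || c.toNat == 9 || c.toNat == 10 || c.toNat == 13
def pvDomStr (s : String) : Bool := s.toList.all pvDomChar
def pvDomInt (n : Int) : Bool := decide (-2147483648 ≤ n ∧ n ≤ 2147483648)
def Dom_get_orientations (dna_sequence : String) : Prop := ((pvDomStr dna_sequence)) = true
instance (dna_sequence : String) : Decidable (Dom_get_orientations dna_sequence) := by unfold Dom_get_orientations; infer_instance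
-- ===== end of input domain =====

-- B replaces A's len//3 / len%3 slice-endpoint case analysis by codon chunking (peel 3-char codons, join) and builds the reverse complement by prepending in one forward pass (objective: alternative); equal on every all-ACGT input (Pre_), both raise KeyError otherwise.

-- ===== PORT A =====
def pvCompA : PySem.Dict Char Char := PySem.Dict.ofList [('A','T'),('T','A'),('G','C'),('C','G')]

-- revc: new += comp[string[i]] over range(len(string)); return new[::-1]; none = KeyError
def revcA (s : String) : Option String :=
  let cs := s.toList
  let newO : Option (List Char) := (PySem.List.pyRange 0 (cs.length : Int) 1).foldl
    (fun acc i => acc.bind (fun new =>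
      ((PySem.List.pyGet? cs i).bind (fun c => PySem.Dict.get? pvCompA c)).map (fun t => new ++ [t])))
    (some [])
  newO.bind (fun new => (PySem.List.slice? new none none (-1)).map String.ofList)

-- sequences = [None]*6 modelled as six "" placeholders: every slot is overwritten before return
def get_orientations (dna_sequence : String) : List String :=
  let d := PySem.Str.upper dna_sequence
  match revcA d with
  | none => []  -- KeyError propagates; excluded by Pre_
  | some rc =>
    let dc := d.toList
    let rcc := rc.toList
    let n : Int := PySem.Int.floordiv (dc.length : Int) 3
    let r : Int := PySem.Int.mod (dc.length : Int) 3
    (PySem.List.pyRange 0 3 1).foldl (fun sequences i =>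
      if r = 2 then
        (sequences.set i.toNat (String.ofList (PySem.List.slice dc (some i) (some (3*n+i))))).set
          (3+i).toNat (String.ofList (PySem.List.slice rcc (some i) (some (3*n+i))))
      else if r = 1 then
        if i ≠ 2 then
          (sequences.set i.toNat (String.ofList (PySem.List.slice dc (some i) (some (3*n+i))))).set
            (3+i).toNat (String.ofList (PySem.List.slice rcc (some i) (some (3*n+i))))
        else
          (sequences.set i.toNat (String.ofList (PySem.List.slice dc (some 2) (some (3*n-1))))).set
            (3+i).toNat (String.ofList (PySem.List.slice rcc (some 2) (some (3*n-1))))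
      else
        if i ≠ 0 then
          (sequences.set i.toNat (String.ofList (PySem.List.slice dc (some i) (some (3*n+i-3))))).set
            (3+i).toNat (String.ofList (PySem.List.slice rcc (some i) (some (3*n+i-3))))
        else
          (sequences.set i.toNat (String.ofList (PySem.List.slice dc (some 0) (some (3*n))))).set
            (3+i).toNat (String.ofList (PySem.List.slice rcc (some 0) (some (3*n)))))
      ["", "", "", "", "", ""]

-- ===== PORT B =====
-- rev = comp[c] + rev over the characters of seq, forward pass; none = KeyError
def revcB (cs : List Char) : Option (List Char) :=
  cs.foldl (fun acc c => acc.bind (fun rev =>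
    (PySem.Dict.get? (PySem.Dict.ofList [('A','T'),('T','A'),('G','C'),('C','G')]) c).map
      (fun t => t :: rev))) (some [])

-- codons: while len(s) >= 3: peel s[:3]
def codonsB (s : List Char) : List (List Char) :=
  if _h : 3 ≤ s.length then s.take 3 :: codonsB (s.drop 3) else []
termination_by s.length
decreasing_by simp only [List.length_drop]; omega

def get_orientations_alt (dna_sequence : String) : List String :=
  let seq := PySem.Str.upper dna_sequence
  match revcB seq.toList with
  | none => []  -- KeyError propagates; excluded by Pre_
  | some revl =>
    [seq.toList, revl].flatMap (fun strand =>
      (PySem.List.pyRange 0 3 1).map (fun i =>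
        String.ofList (codonsB (PySem.List.slice strand (some i) none)).flatten))

-- ===== PRECONDITION & SPEC =====
-- Pre_ excludes inputs containing any character other than A/C/G/T (case-insensitively): there A raises KeyError (and B does too).
def Pre_get_orientations (dna_sequence : String) : Prop :=
  dna_sequence.toList.all (fun c =>
    c == 'A' || c == 'C' || c == 'G' || c == 'T' || c == 'a' || c == 'c' || c == 'g' || c == 't') = true
instance (dna_sequence : String) : Decidable (Pre_get_orientations dna_sequence) := by
  unfold Pre_get_orientations; infer_instance
def pvWitness_get_orientations : String := "ACgt"

def Spec_get_orientations (dna_sequence : String) (out : List String) : Prop := out = get_orientations_alt dna_sequence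
instance (dna_sequence : String) (out : List String) : Decidable (Spec_get_orientations dna_sequence out) := by unfold Spec_get_orientations; infer_instance

-- ===== CLAIM (what is proved, stated in full; the proofs are below) =====
def Claim_equal_get_orientations : Prop := ∀ (dna_sequence : String), Dom_get_orientations dna_sequence → Pre_get_orientations dna_sequence → Spec_get_orientations dna_sequence (get_orientations dna_sequence)

-- ===== LEMMAS AND PROOFS =====

-- Pre_ in the form the revc lemmas use: after upper(), every character is A/C/G/T
theorem pre_upper (s : String) (h : Pre_get_orientations s) :
    ∀ c ∈ (PySem.Str.upper s).toList, c = 'A' ∨ c = 'C' ∨ c = 'G' ∨ c = 'T' := by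
  intro c hc
  rw [PySem.Str.toList_upper, PySem.Chars.upper, List.mem_map] at hc
  obtain ⟨c0, hc0, rfl⟩ := hc
  unfold Pre_get_orientations at h
  rw [List.all_eq_true] at h
  have h8 := h c0 hc0
  simp only [Bool.or_eq_true, beq_iff_eq] at h8
  rcases h8 with (((((((h'|h')|h')|h')|h')|h')|h')|h') <;> subst h' <;> decide

-- the complement as a function; agrees with the dict on A/C/G/T
def compF (c : Char) : Char := if c = 'A' then 'T' else if c = 'T' then 'A' else if c = 'G' then 'C' else 'G'

theorem lookupA_eq (c : Char) (h : c = 'A' ∨ c = 'C' ∨ c = 'G' ∨ c = 'T') :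
    PySem.Dict.get? pvCompA c = some (compF c) := by
  rcases h with h|h|h|h <;> subst h <;> decide

theorem lookupB_eq (c : Char) (h : c = 'A' ∨ c = 'C' ∨ c = 'G' ∨ c = 'T') :
    PySem.Dict.get? (PySem.Dict.ofList [('A','T'),('T','A'),('G','C'),('C','G')]) c = some (compF c) := by
  rcases h with h|h|h|h <;> subst h <;> decide

-- generic: an Option-valued APPEND fold that never fails (A's revc loop)
theorem optfold_eq {α : Type} (g : α → Option Char) :
    ∀ (l : List α) (init : List Char), (∀ x ∈ l, (g x).isSome) →
    l.foldl (fun acc x => acc.bind (fun n => (g x).map (fun t => n ++ [t]))) (some init)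
      = some (init ++ l.filterMap g) := by
  intro l
  induction l with
  | nil => intro init _; simp
  | cons x l ih =>
    intro init h
    obtain ⟨y, hy⟩ := Option.isSome_iff_exists.mp (h x (by simp))
    simp only [List.foldl_cons, Option.bind_some, hy, Option.map_some]
    rw [ih (init ++ [y]) (fun z hz => h z (by simp [hz]))]
    simp [hy]

-- generic: an Option-valued PREPEND fold that never fails (B's revc loop)
theorem optfold_pre {α : Type} (g : α → Option Char) :
    ∀ (l : List α) (init : List Char), (∀ x ∈ l, (g x).isSome) →
    l.foldl (fun acc x => acc.bind (fun n => (g x).map (fun t => t :: n))) (some init)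
      = some ((l.filterMap g).reverse ++ init) := by
  intro l
  induction l with
  | nil => intro init _; simp
  | cons x l ih =>
    intro init h
    obtain ⟨y, hy⟩ := Option.isSome_iff_exists.mp (h x (by simp))
    simp only [List.foldl_cons, Option.bind_some, hy, Option.map_some]
    rw [ih (y :: init) (fun z hz => h z (by simp [hz]))]
    simp [hy]

theorem filterMap_range_eq (cs : List Char)
    (h : ∀ c ∈ cs, c = 'A' ∨ c = 'C' ∨ c = 'G' ∨ c = 'T') :
    (List.range cs.length).filterMap (fun k => cs[k]?.bind (fun c => PySem.Dict.get? pvCompA c))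
      = cs.map compF := by
  induction cs with
  | nil => simp
  | cons c tl ih =>
    rw [List.length_cons, List.range_succ_eq_map, List.filterMap_cons, List.filterMap_map]
    simp only [List.getElem?_cons_zero, Option.bind_some,
      lookupA_eq c (h c (by simp)), List.map_cons]
    rw [show ((fun k => (c :: tl)[k]?.bind (fun c => PySem.Dict.get? pvCompA c)) ∘ Nat.succ)
        = (fun k => tl[k]?.bind (fun c => PySem.Dict.get? pvCompA c)) from rfl]
    rw [ih (fun x hx => h x (by simp [hx]))]

theorem revcA_eq (s : String)
    (h : ∀ c ∈ s.toList, c = 'A' ∨ c = 'C' ∨ c = 'G' ∨ c = 'T') :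
    revcA s = some (String.ofList (s.toList.map compF).reverse) := by
  simp only [revcA]
  have hsome : ∀ i ∈ PySem.List.pyRange 0 (s.toList.length : Int) 1,
      ((PySem.List.pyGet? s.toList i).bind (fun c => PySem.Dict.get? pvCompA c)).isSome := by
    intro i hi
    rw [PySem.List.mem_pyRange_one] at hi
    obtain ⟨k, rfl⟩ := Int.eq_ofNat_of_zero_le hi.1
    have hk : k < s.toList.length := by exact_mod_cast hi.2
    rw [PySem.List.pyGet?_natCast, List.getElem?_eq_getElem hk]
    simp [lookupA_eq _ (h _ (List.getElem_mem hk))]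
  rw [optfold_eq (fun i => (PySem.List.pyGet? s.toList i).bind (fun c => PySem.Dict.get? pvCompA c))
      (PySem.List.pyRange 0 (s.toList.length : Int) 1) [] hsome]
  have hfm : (PySem.List.pyRange 0 (s.toList.length : Int) 1).filterMap
      (fun i => (PySem.List.pyGet? s.toList i).bind (fun c => PySem.Dict.get? pvCompA c))
      = s.toList.map compF := by
    rw [PySem.List.pyRange_one, List.filterMap_map]
    have hcomp : ((fun i => (PySem.List.pyGet? s.toList i).bind (fun c => PySem.Dict.get? pvCompA c))
        ∘ (fun k : Nat => (0 : Int) + (k : Int)))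
        = fun k : Nat => s.toList[k]?.bind (fun c => PySem.Dict.get? pvCompA c) := by
      funext k
      simp [PySem.List.pyGet?_natCast]
    rw [hcomp]
    have : ((s.toList.length : Int) - 0).toNat = s.toList.length := by omega
    rw [this, filterMap_range_eq s.toList h]
  rw [hfm]
  simp [PySem.List.slice?_none_none_neg_one]

theorem revcB_eq (cs : List Char)
    (h : ∀ c ∈ cs, c = 'A' ∨ c = 'C' ∨ c = 'G' ∨ c = 'T') :
    revcB cs = some ((cs.map compF).reverse) := by
  unfold revcB
  rw [optfold_pre (fun c => PySem.Dict.get? (PySem.Dict.ofList [('A','T'),('T','A'),('G','C'),('C','G')]) c) cs []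
      (by intro c hc; simp [lookupB_eq c (h c hc)])]
  rw [List.filterMap_congr (fun c hc => lookupB_eq c (h c hc))]
  simp

-- joining the peeled codons = truncating to the nearest multiple of three
theorem flatten_codons (t : List Char) : (codonsB t).flatten = t.take (t.length / 3 * 3) := by
  rw [codonsB]
  split_ifs with h
  · rw [List.flatten_cons, flatten_codons (t.drop 3), List.length_drop]
    have h3 : t.length / 3 * 3 = 3 + (t.length - 3) / 3 * 3 := by omega
    rw [h3, List.take_add]
  · have h0 : t.length / 3 * 3 = 0 := by omega
    simp [h0]
termination_by t.length
decreasing_by simp only [List.length_drop]; omega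

-- B's frame expression in drop/take normal form
theorem bframe_eq (t : List Char) (i : Int) (hi : 0 ≤ i) :
    (codonsB (PySem.List.slice t (some i) none)).flatten
      = List.take ((t.length - i.toNat) / 3 * 3) (List.drop i.toNat t) := by
  rw [PySem.List.slice_from t hi, flatten_codons, List.length_drop]

-- A's slice in the same normal form, regular case
theorem compo (t : List Char) (a bnd : Int) (ha : 0 ≤ a) (hb : 0 ≤ bnd)
    (heq : bnd.toNat - a.toNat = (t.length - a.toNat) / 3 * 3) :
    PySem.List.slice t (some a) (some bnd)
      = List.take ((t.length - a.toNat) / 3 * 3) (List.drop a.toNat t) := by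
  rw [PySem.List.slice_toNat t ha hb, heq]

theorem slice_oob (t : List Char) (a bnd : Int) (h : (t.length : Int) ≤ a) :
    PySem.List.slice t (some a) (some bnd) = [] := by
  apply List.eq_nil_of_length_eq_zero
  rw [PySem.List.length_slice]
  have h2 : PySem.List.clampIdx t.length bnd ≤ t.length := PySem.List.clampIdx_le _ _
  have h3 : PySem.List.clampIdx t.length a = t.length := by
    unfold PySem.List.clampIdx; split_ifs <;> omega
  omega

-- A's slice in the same normal form when the start is past the end (degenerate lengths)
theorem compo_oob (t : List Char) (a bnd : Int) (h : (t.length : Int) ≤ a) :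
    PySem.List.slice t (some a) (some bnd)
      = List.take ((t.length - a.toNat) / 3 * 3) (List.drop a.toNat t) := by
  rw [slice_oob t a bnd h, List.drop_eq_nil_of_le (by omega), List.take_nil]

-- [None]*6 with the six assignments the loop performs, evaluated
theorem set6_eq (x0 x3 y1 y4 z2 z5 : String) :
    ((((([("" : String), "", "", "", "", ""].set 0 x0).set 3 x3).set 1 y1).set 4 y4).set 2 z2).set 5 z5
      = [x0, y1, z2, x3, y4, z5] := rfl

-- ===== VERDICT (by name: the statement is the Claim_ definition above) =====
theorem get_orientations_spec : Claim_equal_get_orientations := by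
  intro s _ hpre
  unfold Spec_get_orientations
  have hpre' := pre_upper s hpre
  have hA := revcA_eq (PySem.Str.upper s) hpre'
  have hB := revcB_eq (PySem.Str.upper s).toList hpre'
  have hr3 : PySem.List.pyRange 0 3 1 = [0, 1, 2] := by decide
  simp only [get_orientations, get_orientations_alt, hA, hB, hr3, List.foldl_cons,
    List.foldl_nil, String.toList_ofList, List.flatMap_cons, List.flatMap_nil,
    List.map_cons, List.map_nil, List.append_nil, List.cons_append, List.nil_append]
  generalize (PySem.Str.upper s).toList = cs
  have hd : PySem.Int.floordiv (↑cs.length) 3 = (↑cs.length : Int) / 3 :=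
    PySem.Int.floordiv_eq_ediv_of_pos (by norm_num)
  have hrl : ((List.map compF cs).reverse).length = cs.length := by simp
  obtain h3 | h3 | h3 : cs.length % 3 = 0 ∨ cs.length % 3 = 1 ∨ cs.length % 3 = 2 := by omega
  · have hm : PySem.Int.mod (↑cs.length) 3 = 0 := by
      rw [PySem.Int.mod_eq_emod_of_pos (by norm_num)]; omega
    simp only [hm, hd, Int.reduceEq, reduceIte, ne_eq, not_false_eq_true,
      not_true_eq_false, add_zero, Int.reduceToNat, Int.reduceAdd, set6_eq,
      List.cons.injEq, and_true]
    by_cases hsm : cs.length = 0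
    all_goals refine ⟨?_, ?_, ?_, ?_, ?_, ?_⟩ <;> rw [bframe_eq _ _ (by norm_num)] <;>
      first
        | exact congrArg _ (compo _ _ _ (by norm_num) (by omega) (by omega))
        | exact congrArg _ (compo_oob _ _ _ (by omega))
  · have hm : PySem.Int.mod (↑cs.length) 3 = 1 := by
      rw [PySem.Int.mod_eq_emod_of_pos (by norm_num)]; omega
    simp only [hm, hd, Int.reduceEq, reduceIte, ne_eq, not_false_eq_true,
      not_true_eq_false, add_zero, Int.reduceToNat, Int.reduceAdd, set6_eq,
      List.cons.injEq, and_true]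
    by_cases hsm : cs.length ≤ 2
    all_goals refine ⟨?_, ?_, ?_, ?_, ?_, ?_⟩ <;> rw [bframe_eq _ _ (by norm_num)] <;>
      first
        | exact congrArg _ (compo _ _ _ (by norm_num) (by omega) (by omega))
        | exact congrArg _ (compo_oob _ _ _ (by omega))
  · have hm : PySem.Int.mod (↑cs.length) 3 = 2 := by
      rw [PySem.Int.mod_eq_emod_of_pos (by norm_num)]; omega
    simp only [hm, hd, Int.reduceEq, reduceIte, add_zero, Int.reduceToNat, Int.reduceAdd,
      set6_eq, List.cons.injEq, and_true]
    refine ⟨?_, ?_, ?_, ?_, ?_, ?_⟩ <;> rw [bframe_eq _ _ (by norm_num)] <;>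
      exact congrArg _ (compo _ _ _ (by norm_num) (by omega) (by omega))
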